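-- pv_equiv track=rewrite | github.com/dapiced/redhat_summary_status | redhat_summary_status.py | filter_services
-- ===== SOURCE A (Python) =====
-- from typing import Dict, List, Optional, Any, Union, Tuple, NamedTuple
--
-- def filter_services(services: List[Dict[str, Any]], status_filter: str, search_term: Optional[str] = None) -> List[Dict[str, Any]]:
--     """Filter services based on status and search criteria"""
--     filtered = services.copy()
--
--     # Filter by status
--     if status_filter == 'operational':
--         filtered = [s for s in filtered if s.get('status') == 'operational']
--     elif status_filter == 'issues':
--         filtered = [s for s in filtered if s.get('status') != 'operational']
--
--     # Filter by search term
--     if search_term: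
--         search_lower = search_term.lower()
--         filtered = [s for s in filtered if search_lower in s.get('name', '').lower()]
--
--     return filtered
-- ===== SOURCE B (Python) =====
-- def filter_services(services, status_filter, search_term=None):
--     """Bucket pass: one sweep sorts search-matching services into three ordered
--     buckets (operational / non-operational / all), then the status filter just
--     selects which finished bucket to return."""
--     needle = search_term.lower() if search_term else None
--     ops, nonops, everything = [], [], []
--     for s in services:
--         if needle is not None and needle not in s.get('name', '').lower():
--             continue
--         everything.append(s)
--         if s.get('status') == 'operational':
--             ops.append(s)
--         else:
--             nonops.append(s)
--     if status_filter == 'operational':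
--         return ops
--     if status_filter == 'issues':
--         return nonops
--     return everything
-- ===== Notes on version B (the rewrite author's own statement) =====
-- stated objective: alternative
-- what changed: Replaced A's staged list comprehensions with a single bucket-partition sweep that distributes search-matching services into three ordered buckets (operational / non-operational / all) and then merely selects the bucket named by status_filter.
import Mathlib
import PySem

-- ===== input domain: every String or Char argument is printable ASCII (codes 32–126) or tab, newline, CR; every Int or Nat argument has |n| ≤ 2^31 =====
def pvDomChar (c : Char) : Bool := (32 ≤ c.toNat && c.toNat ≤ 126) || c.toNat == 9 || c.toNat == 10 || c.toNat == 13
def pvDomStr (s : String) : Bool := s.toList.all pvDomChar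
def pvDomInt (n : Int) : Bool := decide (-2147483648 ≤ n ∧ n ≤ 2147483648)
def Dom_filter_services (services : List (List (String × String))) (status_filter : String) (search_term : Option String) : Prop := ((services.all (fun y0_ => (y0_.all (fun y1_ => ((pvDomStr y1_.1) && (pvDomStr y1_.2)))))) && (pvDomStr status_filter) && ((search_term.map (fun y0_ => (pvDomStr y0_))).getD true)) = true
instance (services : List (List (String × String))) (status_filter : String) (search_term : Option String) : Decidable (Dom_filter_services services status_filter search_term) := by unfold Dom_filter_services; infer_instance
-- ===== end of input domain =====

-- B replaces A's staged list comprehensions with one bucket-partition sweep into three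
-- ordered buckets and a final bucket selection; return value only (A does not mutate).

-- shared helper: Python dict.get on an association list (first match)
def svcGet (d : List (String × String)) (k : String) : Option String :=
  (d.find? (fun p => p.1 == k)).map (·.2)

-- ===== PORT A =====
def filter_services (services : List (List (String × String))) (status_filter : String) (search_term : Option String) : List (List (String × String)) :=
  let filtered := services
  let filtered :=
    if status_filter == "operational" then
      filtered.filter (fun s => svcGet s "status" == some "operational")
    else if status_filter == "issues" then
      filtered.filter (fun s => svcGet s "status" != some "operational")
    else filtered
  match search_term with
  | none => filtered
  | some t =>
    if t == "" then filtered
    else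
      let search_lower := PySem.Str.lower t
      filtered.filter (fun s => PySem.Str.isIn search_lower (PySem.Str.lower ((svcGet s "name").getD "")))

-- ===== PORT B =====
-- does service s pass the search criterion encoded by needle?
def passes (needle : Option String) (s : List (String × String)) : Bool :=
  match needle with
  | none => true
  | some n => PySem.Str.isIn n (PySem.Str.lower ((svcGet s "name").getD ""))

-- the bucket sweep: distribute each search-matching service into (ops, nonops, everything)
def bucketStep (needle : Option String)
    (acc : List (List (String × String)) × List (List (String × String)) × List (List (String × String)))
    (s : List (String × String)) :
    List (List (String × String)) × List (List (String × String)) × List (List (String × String)) :=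
  if !passes needle s then acc
  else
    let (ops, nonops, everything) := acc
    if svcGet s "status" == some "operational" then (ops ++ [s], nonops, everything ++ [s])
    else (ops, nonops ++ [s], everything ++ [s])

def filter_services_alt (services : List (List (String × String))) (status_filter : String) (search_term : Option String) : List (List (String × String)) :=
  let needle : Option String :=
    match search_term with
    | none => none
    | some t => if t == "" then none else some (PySem.Str.lower t)
  let res := services.foldl (bucketStep needle) ([], [], [])
  if status_filter == "operational" then res.1
  else if status_filter == "issues" then res.2.1
  else res.2.2

-- ===== PRECONDITION & SPEC =====
def Spec_filter_services (services : List (List (String × String))) (status_filter : String) (search_term : Option String) (out : List (List (String × String))) : Prop := out = filter_services_alt services status_filter search_term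
instance (services : List (List (String × String))) (status_filter : String) (search_term : Option String) (out : List (List (String × String))) : Decidable (Spec_filter_services services status_filter search_term out) := by unfold Spec_filter_services; infer_instance

-- ===== CLAIM (what is proved, stated in full; the proofs are below) =====
def Claim_equal_filter_services : Prop := ∀ (services : List (List (String × String))) (status_filter : String) (search_term : Option String), Dom_filter_services services status_filter search_term → Spec_filter_services services status_filter search_term (filter_services services status_filter search_term)

-- ===== LEMMAS AND PROOFS =====

def isOp (s : List (String × String)) : Bool := svcGet s "status" == some "operational"

theorem bucket_invariant (needle : Option String) (l : List (List (String × String)))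
    (ops nonops everything : List (List (String × String))) :
    l.foldl (bucketStep needle) (ops, nonops, everything) =
      (ops ++ l.filter (fun s => passes needle s && isOp s),
       nonops ++ l.filter (fun s => passes needle s && !isOp s),
       everything ++ l.filter (fun s => passes needle s)) := by
  induction l generalizing ops nonops everything with
  | nil => simp
  | cons a t ih =>
    simp only [List.foldl_cons, bucketStep]
    by_cases hp : passes needle a
    · by_cases ho : isOp a <;> simp [isOp] at ho <;>
        simp [hp, ho, ih, isOp]
    · simp [hp, ih]

-- ===== VERDICT (by name: the statement is the Claim_ definition above) =====
theorem filter_services_spec : Claim_equal_filter_services := by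
  intro services status_filter search_term _
  unfold Spec_filter_services filter_services filter_services_alt
  cases search_term with
  | none =>
    simp only [bucket_invariant, passes, isOp]
    split_ifs <;> simp [bne]
  | some t =>
    by_cases ht : t == ""
    · simp only [ht, if_pos, bucket_invariant, passes, isOp]
      split_ifs <;> simp [bne]
    · simp only [ht, if_neg, Bool.false_eq_true, not_false_eq_true,
        bucket_invariant, passes, isOp]
      split_ifs <;>
        simp [Bool.and_comm, bne]
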